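-- pv_equiv track=rewrite | github.com/ASorceror/blueprint_pipeline | src/pipeline.py | get_pages_to_process
-- ===== SOURCE A (Python) =====
-- from typing import List, Dict, Optional, Tuple, Any
--
-- def get_pages_to_process(page_spec: str, total_pages: int) -> List[int]:
--     """
--     Parse page specification to list of 0-indexed page numbers.
--
--     Args:
--         page_spec: Page specification (e.g., "all", "1-5", "1,3,5")
--         total_pages: Total pages in PDF
--
--     Returns:
--         List of 0-indexed page numbers
--     """
--     if page_spec.lower() == "all":
--         return list(range(total_pages))
--
--     pages = set()
--     for part in page_spec.split(","):
--         part = part.strip()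
--         if "-" in part:
--             start, end = part.split("-")
--             start = int(start) - 1
--             end = int(end) - 1
--             pages.update(range(start, end + 1))
--         else:
--             pages.add(int(part) - 1)
--
--     return sorted([p for p in pages if 0 <= p < total_pages])
-- ===== SOURCE B (Python) =====
-- def get_pages_to_process(page_spec: str, total_pages: int) -> list:
--     """Parse page specification to list of 0-indexed page numbers (interval-merge version)."""
--     if page_spec.lower() == "all":
--         return list(range(total_pages))
--
--     intervals = []
--     for part in page_spec.split(","):
--         part = part.strip()
--         if "-" in part:
--             start, end = part.split("-")
--             lo = int(start) - 1
--             hi = int(end) - 1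
--         else:
--             lo = hi = int(part) - 1
--         lo = max(lo, 0)
--         hi = min(hi, total_pages - 1)
--         if lo <= hi:
--             intervals.append((lo, hi))
--
--     intervals.sort(key=lambda iv: iv[0])
--     result = []
--     prev = -1
--     for lo, hi in intervals:
--         start = max(lo, prev + 1)
--         result.extend(range(start, hi + 1))
--         prev = max(prev, hi)
--     return result
-- ===== Notes on version B (the rewrite author's own statement) =====
-- stated objective: alternative
-- what changed: Replaces A's accumulate-pages-into-a-set then sort-and-filter pipeline by interval merging: each comma part becomes one interval clamped to [0, total_pages), the intervals are sorted by start and merged in a single sweep that emits the ascending result directly, so no per-page set, no final filter and no sort of individual pages.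
import Mathlib
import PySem

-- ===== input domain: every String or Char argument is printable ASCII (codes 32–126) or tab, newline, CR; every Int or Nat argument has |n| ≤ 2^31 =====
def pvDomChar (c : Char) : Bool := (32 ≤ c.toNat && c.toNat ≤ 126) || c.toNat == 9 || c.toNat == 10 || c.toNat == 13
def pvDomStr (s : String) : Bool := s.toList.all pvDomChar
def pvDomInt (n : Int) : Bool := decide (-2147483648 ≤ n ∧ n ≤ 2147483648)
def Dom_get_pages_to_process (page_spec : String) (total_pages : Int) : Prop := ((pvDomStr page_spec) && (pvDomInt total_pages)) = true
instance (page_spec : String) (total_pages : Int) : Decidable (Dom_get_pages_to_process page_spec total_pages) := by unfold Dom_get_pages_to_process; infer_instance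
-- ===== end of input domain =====

-- B replaces A's page-set + final sort by clamped intervals merged in one sorted sweep that emits
-- the ascending result directly (no per-page set, no sort of pages); same parse branches, same
-- int() exceptions (excluded by Pre_).

-- ===== PORT A =====
-- one comma part of A's loop body: update the set of requested 0-indexed pages
def pvStepA (pages : PySem.Set Int) (part : List Char) : PySem.Set Int :=
  -- part = part.strip() is inlined below
  if '-' ∈ PySem.Chars.strip part then
    match PySem.Chars.splitOn (PySem.Chars.strip part) ['-'] with
    | [s, e] =>
      match PySem.Int.ofChars? s, PySem.Int.ofChars? e with
      | some sv, some ev =>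
        -- pages.update(range(start, end + 1)) with start = sv - 1, end = ev - 1
        PySem.Set.update pages (PySem.List.pyRange (sv - 1) ((ev - 1) + 1) 1)
      | _, _ => pages          -- int() raises here: unreachable under Pre_
    | _ => pages               -- 'start, end =' unpack raises here: unreachable under Pre_
  else
    match PySem.Int.ofChars? (PySem.Chars.strip part) with
    | some pv => PySem.Set.add pages (pv - 1)
    | none => pages            -- int() raises here: unreachable under Pre_

def get_pages_to_process (page_spec : String) (total_pages : Int) : List Int :=
  if PySem.Str.lower page_spec == "all" then
    PySem.List.pyRange 0 total_pages 1
  else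
    let pages := (PySem.Chars.splitOn page_spec.toList [',']).foldl pvStepA PySem.Set.empty
    PySem.List.sorted (pages.filter (fun p => decide (0 ≤ p) && decide (p < total_pages))) (fun x => x) false

-- ===== PORT B =====
-- one comma part of B's loop body: append the requested page interval, clamped to [0, total_pages)
def pvStepB (total_pages : Int) (acc : List (Int × Int)) (part : List Char) : List (Int × Int) :=
  -- part = part.strip() and lo/hi are inlined below ('lo = max(lo, 0)', 'hi = min(hi, total_pages - 1)')
  if '-' ∈ PySem.Chars.strip part then
    match PySem.Chars.splitOn (PySem.Chars.strip part) ['-'] with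
    | [s, e] =>
      match PySem.Int.ofChars? s, PySem.Int.ofChars? e with
      | some sv, some ev =>
        if max (sv - 1) 0 ≤ min (ev - 1) (total_pages - 1) then
          acc ++ [(max (sv - 1) 0, min (ev - 1) (total_pages - 1))]
        else acc
      | _, _ => acc            -- int() raises here: unreachable under Pre_
    | _ => acc                 -- unpack raises here: unreachable under Pre_
  else
    match PySem.Int.ofChars? (PySem.Chars.strip part) with
    | some pv =>
      if max (pv - 1) 0 ≤ min (pv - 1) (total_pages - 1) then
        acc ++ [(max (pv - 1) 0, min (pv - 1) (total_pages - 1))]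
      else acc
    | none => acc              -- int() raises here: unreachable under Pre_

def get_pages_to_process_alt (page_spec : String) (total_pages : Int) : List Int :=
  if PySem.Str.lower page_spec == "all" then
    PySem.List.pyRange 0 total_pages 1
  else
    let intervals := (PySem.Chars.splitOn page_spec.toList [',']).foldl (pvStepB total_pages) []
    -- intervals.sort(key=lambda iv: iv[0])
    let sortedIv := PySem.List.sorted intervals (fun p => p.1) false
    -- the sweep: result/prev accumulator, 'result.extend(range(max(lo, prev + 1), hi + 1)); prev = max(prev, hi)'
    (sortedIv.foldl
      (fun (st : List Int × Int) p =>
        (st.1 ++ PySem.List.pyRange (max p.1 (st.2 + 1)) (p.2 + 1) 1, max st.2 p.2))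
      ([], -1)).1

-- ===== PRECONDITION & SPEC =====
-- Pre_ excludes exactly the inputs where Python A raises: some comma part (stripped) is not an int
-- literal (ValueError from int()), or a part containing '-' does not split on '-' into exactly two
-- int literals (ValueError from unpacking or from int()).
def Pre_get_pages_to_process (page_spec : String) (total_pages : Int) : Prop :=
  PySem.Str.lower page_spec = "all" ∨
  ∀ part ∈ PySem.Chars.splitOn page_spec.toList [','],
    let p := PySem.Chars.strip part
    if '-' ∈ p then
      (PySem.Chars.splitOn p ['-']).length = 2 ∧
      ∀ q ∈ PySem.Chars.splitOn p ['-'], (PySem.Int.ofChars? q).isSome = true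
    else (PySem.Int.ofChars? p).isSome = true
instance (page_spec : String) (total_pages : Int) : Decidable (Pre_get_pages_to_process page_spec total_pages) := by unfold Pre_get_pages_to_process; infer_instance

def pvWitness_get_pages_to_process : String × Int := ("1-3, 7 ,2", 5)

def Spec_get_pages_to_process (page_spec : String) (total_pages : Int) (out : List Int) : Prop := out = get_pages_to_process_alt page_spec total_pages
instance (page_spec : String) (total_pages : Int) (out : List Int) : Decidable (Spec_get_pages_to_process page_spec total_pages out) := by unfold Spec_get_pages_to_process; infer_instance

-- ===== CLAIM (what is proved, stated in full; the proofs are below) =====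
def Claim_equal_get_pages_to_process : Prop := ∀ (page_spec : String) (total_pages : Int), Dom_get_pages_to_process page_spec total_pages → Pre_get_pages_to_process page_spec total_pages → Spec_get_pages_to_process page_spec total_pages (get_pages_to_process page_spec total_pages)

-- ===== LEMMAS AND PROOFS =====

-- the parsing loops: A's page set and B's clamped interval list describe the same in-range pages
theorem pv_fold_inv (tp : Int) (parts : List (List Char)) (pages : PySem.Set Int)
    (acc : List (Int × Int)) (hnd : pages.Nodup)
    (hwf : ∀ p ∈ acc, 0 ≤ p.1 ∧ p.1 ≤ p.2 ∧ p.2 < tp)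
    (hmem : ∀ x : Int, 0 ≤ x → x < tp → (x ∈ pages ↔ ∃ p ∈ acc, p.1 ≤ x ∧ x ≤ p.2)) :
    (parts.foldl pvStepA pages).Nodup ∧
    (∀ p ∈ parts.foldl (pvStepB tp) acc, 0 ≤ p.1 ∧ p.1 ≤ p.2 ∧ p.2 < tp) ∧
    ∀ x : Int, 0 ≤ x → x < tp →
      (x ∈ parts.foldl pvStepA pages ↔
        ∃ p ∈ parts.foldl (pvStepB tp) acc, p.1 ≤ x ∧ x ≤ p.2) := by
  induction parts generalizing pages acc with
  | nil => exact ⟨hnd, hwf, hmem⟩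
  | cons part t ih =>
    simp only [List.foldl_cons]
    have step : (pvStepA pages part).Nodup ∧
        (∀ p ∈ pvStepB tp acc part, 0 ≤ p.1 ∧ p.1 ≤ p.2 ∧ p.2 < tp) ∧
        ∀ x : Int, 0 ≤ x → x < tp →
          (x ∈ pvStepA pages part ↔ ∃ p ∈ pvStepB tp acc part, p.1 ≤ x ∧ x ≤ p.2) := by
      unfold pvStepA pvStepB
      split_ifs with hdash
      · -- hyphen branch
        cases hsp : PySem.Chars.splitOn (PySem.Chars.strip part) ['-'] with
        | nil => exact ⟨hnd, hwf, hmem⟩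
        | cons s rest =>
          cases rest with
          | nil => exact ⟨hnd, hwf, hmem⟩
          | cons e rest2 =>
            cases rest2 with
            | cons _ _ => exact ⟨hnd, hwf, hmem⟩
            | nil =>
              cases hs : PySem.Int.ofChars? s with
              | none => simp only [hs]; exact ⟨hnd, hwf, hmem⟩
              | some sv =>
                cases he : PySem.Int.ofChars? e with
                | none => simp only [hs, he]; exact ⟨hnd, hwf, hmem⟩
                | some ev =>
                  simp only [hs, he]
                  refine ⟨PySem.Set.nodup_update _ _ hnd, ?_, ?_⟩
                  · split_ifs with hcl
                    · intro p hp
                      rcases List.mem_append.1 hp with h | h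
                      · exact hwf p h
                      · rcases List.mem_singleton.1 h with rfl
                        refine ⟨by omega, by omega, by omega⟩
                    · exact hwf
                  · intro x hx0 hxt
                    rw [PySem.Set.mem_update, hmem x hx0 hxt, PySem.List.mem_pyRange_one]
                    split_ifs with hcl
                    · constructor
                      · rintro (⟨p, hp, hb⟩ | hr)
                        · exact ⟨p, List.mem_append.2 (Or.inl hp), hb⟩
                        · exact ⟨_, List.mem_append.2 (Or.inr (List.mem_singleton.2 rfl)),
                            by omega, by omega⟩
                      · rintro ⟨p, hp, hb1, hb2⟩
                        rcases List.mem_append.1 hp with h | h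
                        · exact Or.inl ⟨p, h, hb1, hb2⟩
                        · rcases List.mem_singleton.1 h with rfl
                          right; constructor <;> omega
                    · constructor
                      · rintro (⟨p, hp, hb⟩ | hr)
                        · exact ⟨p, hp, hb⟩
                        · exact absurd (by omega : max (sv - 1) 0 ≤ min (ev - 1) (tp - 1)) hcl
                      · rintro ⟨p, hp, hb⟩
                        exact Or.inl ⟨p, hp, hb⟩
      · -- plain branch
        cases hp : PySem.Int.ofChars? (PySem.Chars.strip part) with
        | none => exact ⟨hnd, hwf, hmem⟩
        | some pv =>
          simp only [hp]
          refine ⟨PySem.Set.nodup_add _ _ hnd, ?_, ?_⟩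
          · split_ifs with hcl
            · intro p hp'
              rcases List.mem_append.1 hp' with h | h
              · exact hwf p h
              · rcases List.mem_singleton.1 h with rfl
                refine ⟨by omega, by omega, by omega⟩
            · exact hwf
          · intro x hx0 hxt
            rw [PySem.Set.mem_add, hmem x hx0 hxt]
            split_ifs with hcl
            · constructor
              · rintro (⟨p, hp', hb⟩ | rfl)
                · exact ⟨p, List.mem_append.2 (Or.inl hp'), hb⟩
                · exact ⟨_, List.mem_append.2 (Or.inr (List.mem_singleton.2 rfl)),
                    by omega, by omega⟩
              · rintro ⟨p, hp', hb1, hb2⟩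
                rcases List.mem_append.1 hp' with h | h
                · exact Or.inl ⟨p, h, hb1, hb2⟩
                · rcases List.mem_singleton.1 h with rfl
                  right; omega
            · constructor
              · rintro (⟨p, hp', hb⟩ | rfl)
                · exact ⟨p, hp', hb⟩
                · exact absurd (by omega : max (pv - 1) 0 ≤ min (pv - 1) (tp - 1)) hcl
              · rintro ⟨p, hp', hb⟩
                exact Or.inl ⟨p, hp', hb⟩
    exact ih _ _ step.1 step.2.1 step.2.2

-- the merge sweep over intervals sorted by start emits exactly the union, in ascending order
theorem pv_sweep (L : List (Int × Int)) (res : List Int) (prev : Int)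
    (hinc : res.Pairwise (· < ·))
    (hle : ∀ x ∈ res, x ≤ prev)
    (hsorted : L.Pairwise (fun a b => a.1 ≤ b.1))
    (hgap : ∀ r ∈ L, ∀ x : Int, r.1 ≤ x → x ≤ prev → x ∈ res) :
    (L.foldl (fun (st : List Int × Int) p =>
        (st.1 ++ PySem.List.pyRange (max p.1 (st.2 + 1)) (p.2 + 1) 1, max st.2 p.2))
      (res, prev)).1.Pairwise (· < ·) ∧
    ∀ x : Int, x ∈ (L.foldl (fun (st : List Int × Int) p =>
        (st.1 ++ PySem.List.pyRange (max p.1 (st.2 + 1)) (p.2 + 1) 1, max st.2 p.2))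
      (res, prev)).1 ↔ x ∈ res ∨ ∃ p ∈ L, p.1 ≤ x ∧ x ≤ p.2 := by
  induction L generalizing res prev with
  | nil => exact ⟨hinc, fun x => by simp⟩
  | cons r t ih =>
    simp only [List.foldl_cons]
    have hhead : ∀ r' ∈ t, r.1 ≤ r'.1 := fun r' hr' => List.rel_of_pairwise_cons hsorted hr'
    have hinc' : (res ++ PySem.List.pyRange (max r.1 (prev + 1)) (r.2 + 1) 1).Pairwise (· < ·) := by
      rw [List.pairwise_append]
      refine ⟨hinc, PySem.List.pairwise_lt_pyRange_one _ _, fun x hx y hy => ?_⟩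
      rw [PySem.List.mem_pyRange_one] at hy
      have := hle x hx
      omega
    have hle' : ∀ x ∈ res ++ PySem.List.pyRange (max r.1 (prev + 1)) (r.2 + 1) 1,
        x ≤ max prev r.2 := by
      intro x hx
      rcases List.mem_append.1 hx with h | h
      · have := hle x h; omega
      · rw [PySem.List.mem_pyRange_one] at h; omega
    have hgap' : ∀ r' ∈ t, ∀ x : Int, r'.1 ≤ x → x ≤ max prev r.2 →
        x ∈ res ++ PySem.List.pyRange (max r.1 (prev + 1)) (r.2 + 1) 1 := by
      intro r' hr' x hx1 hx2
      rcases (by omega : x ≤ prev ∨ prev < x) with hcase | hcase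
      · exact List.mem_append.2 (Or.inl (hgap r (by simp) x (le_trans (hhead r' hr') hx1) hcase))
      · refine List.mem_append.2 (Or.inr ?_)
        rw [PySem.List.mem_pyRange_one]
        have := hhead r' hr'
        omega
    obtain ⟨c1, c2⟩ := ih _ _ hinc' hle' (List.Pairwise.of_cons hsorted) hgap'
    refine ⟨c1, fun x => ?_⟩
    rw [c2 x, List.mem_append, PySem.List.mem_pyRange_one]
    constructor
    · rintro ((h | h) | ⟨p, hp, hb⟩)
      · exact Or.inl h
      · exact Or.inr ⟨r, by simp, by omega, by omega⟩
      · exact Or.inr ⟨p, by simp [hp], hb⟩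
    · rintro (h | ⟨p, hp, hb1, hb2⟩)
      · exact Or.inl (Or.inl h)
      · rcases List.mem_cons.1 hp with rfl | hp'
        · rcases (by omega : x ≤ prev ∨ prev < x) with hcase | hcase
          · exact Or.inl (Or.inl (hgap p (by simp) x hb1 hcase))
          · exact Or.inl (Or.inr (by omega))
        · exact Or.inr ⟨p, hp', hb1, hb2⟩

-- ===== VERDICT (by name: the statement is the Claim_ definition above) =====
theorem get_pages_to_process_spec : Claim_equal_get_pages_to_process := by
  intro page_spec total_pages _ _
  unfold Spec_get_pages_to_process get_pages_to_process get_pages_to_process_alt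
  cases hall : (PySem.Str.lower page_spec == "all") with
  | true => simp
  | false =>
    simp only [Bool.false_eq_true, if_false]
    set parts := PySem.Chars.splitOn page_spec.toList [','] with hparts
    obtain ⟨hnd, hwf, hmem⟩ := pv_fold_inv total_pages parts PySem.Set.empty []
      (by simp [PySem.Set.empty]) (by simp) (by simp [PySem.Set.empty])
    set intervals := parts.foldl (pvStepB total_pages) [] with hiv
    set pages := parts.foldl pvStepA PySem.Set.empty with hpg
    have hwf_s : ∀ p ∈ PySem.List.sorted intervals (fun p => p.1) false,
        0 ≤ p.1 ∧ p.1 ≤ p.2 ∧ p.2 < total_pages := by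
      intro p hp
      exact hwf p ((PySem.List.mem_sorted _ _ _ _).1 hp)
    obtain ⟨c1, c2⟩ := pv_sweep (PySem.List.sorted intervals (fun p => p.1) false) [] (-1)
      (by simp) (by simp)
      (PySem.List.sorted_pairwise intervals (fun p => p.1))
      (by intro r hr x hx1 hx2
          have := (hwf_s r hr).1
          omega)
    apply PySem.List.sorted_eq_of_perm_of_pairwise_lt
    · rw [List.perm_ext_iff_of_nodup
        (List.Pairwise.imp ne_of_lt c1) (List.Nodup.filter _ hnd)]
      intro x
      rw [c2 x, List.mem_filter]
      simp only [List.not_mem_nil, false_or, Bool.and_eq_true, decide_eq_true_eq]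
      constructor
      · rintro ⟨p, hp, hb1, hb2⟩
        obtain ⟨h1, _, h3⟩ := hwf_s p hp
        have hx0 : 0 ≤ x := by omega
        have hxt : x < total_pages := by omega
        exact ⟨(hmem x hx0 hxt).2 ⟨p, (PySem.List.mem_sorted _ _ _ _).1 hp, hb1, hb2⟩, hx0, hxt⟩
      · rintro ⟨hmem', hx0, hxt⟩
        obtain ⟨p, hp, hb⟩ := (hmem x hx0 hxt).1 hmem'
        exact ⟨p, (PySem.List.mem_sorted _ _ _ _).2 hp, hb⟩
    · exact c1
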